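-- pv_equiv track=rewrite | github.com/Commit2Cosmos/MetaHackerCupSolutions | 2022/Qualification/D_SecondFlight.py | solve
-- ===== SOURCE A (Python) =====
-- def solve(X, Y, adj_lst) -> int:
--
--     tot = 0
--
--     for connection in adj_lst[X]:
--         if connection == Y:
--             tot += 2 * adj_lst[X][connection]
--
--         if connection in adj_lst[Y]:
--             tot += min(adj_lst[X][connection], adj_lst[Y][connection])
--
--     return tot
-- ===== SOURCE B (Python) =====
-- def solve(X, Y, adj_lst) -> int:
--     # Sort-merge: sort both adjacency item lists by key and sweep them with two
--     # pointers, summing min weights on equal keys; the doubled X-Y edge term is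
--     # added once up front. Return value only.
--     xs = sorted(adj_lst[X].items(), key=lambda p: p[0])
--     ys = sorted(adj_lst[Y].items(), key=lambda p: p[0])
--     tot = 2 * adj_lst[X].get(Y, 0)
--     i = j = 0
--     while i < len(xs) and j < len(ys):
--         a, w = xs[i]
--         b, v = ys[j]
--         if a < b:
--             i += 1
--         elif b < a:
--             j += 1
--         else:
--             tot += min(w, v)
--             i += 1
--             j += 1
--     return tot
-- ===== Notes on version B (the rewrite author's own statement) =====
-- stated objective: alternative
-- what changed: B replaces A's fused loop over X's keys with per-key dict lookups by a sort-then-merge: both adjacency item lists are sorted by key and swept with a two-pointer merge that sums min weights on equal keys, with the doubled X-Y edge term computed once up front via .get(Y, 0).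
-- outside the precondition, e.g. on solve(0, 1, {0: {}}): A returns 0, B raises KeyError
import Mathlib
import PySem

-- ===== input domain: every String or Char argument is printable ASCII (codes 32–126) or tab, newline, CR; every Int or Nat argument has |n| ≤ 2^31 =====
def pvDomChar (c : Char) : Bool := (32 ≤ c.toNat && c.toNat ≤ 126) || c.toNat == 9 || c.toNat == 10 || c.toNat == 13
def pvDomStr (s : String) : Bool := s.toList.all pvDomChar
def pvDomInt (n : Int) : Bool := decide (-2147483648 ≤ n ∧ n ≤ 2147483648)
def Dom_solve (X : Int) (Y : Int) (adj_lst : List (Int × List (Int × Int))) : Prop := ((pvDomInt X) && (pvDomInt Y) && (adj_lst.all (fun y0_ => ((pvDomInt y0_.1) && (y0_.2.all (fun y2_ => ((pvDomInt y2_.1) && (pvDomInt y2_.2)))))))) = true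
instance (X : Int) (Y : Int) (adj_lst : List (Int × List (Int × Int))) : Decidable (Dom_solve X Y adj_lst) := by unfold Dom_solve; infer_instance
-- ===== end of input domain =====

-- B sorts both adjacency item lists by key and sweeps them with a two-pointer merge,
-- summing min weights on equal keys, with the doubled X-Y term added once up front,
-- instead of A's fused loop over X's keys with per-key dict lookups; return value only.

-- ===== PORT A =====
-- dict lookups d[k] raise KeyError on a missing key; Pre_solve guarantees the keys are present,
-- so getD 0 / getD [] stand in for the raising lookup on every admitted input.
-- adj_lst[X] / adj_lst[Y] are hoisted into lets: the lookups are pure, the values are identical.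
def solve (X : Int) (Y : Int) (adj_lst : List (Int × List (Int × Int))) : Int :=
  let axl := (PySem.Dict.mk adj_lst).getD X []
  let ayl := (PySem.Dict.mk adj_lst).getD Y []
  axl.foldl
    (fun tot p =>
      let tot := if p.1 == Y then tot + 2 * (PySem.Dict.mk axl).getD p.1 0 else tot
      if (PySem.Dict.mk ayl).contains p.1 then
        tot + min ((PySem.Dict.mk axl).getD p.1 0) ((PySem.Dict.mk ayl).getD p.1 0)
      else tot)
    0

-- ===== PORT B =====
-- the while loop over indices i, j: structural recursion on the two list suffixes,
-- tot carried as the accumulator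
def pvMergeLoop : List (Int × Int) → List (Int × Int) → Int → Int
  | [], _, tot => tot
  | _ :: _, [], tot => tot
  | (a, w) :: xs, (b, v) :: ys, tot =>
    if a < b then pvMergeLoop xs ((b, v) :: ys) tot
    else if b < a then pvMergeLoop ((a, w) :: xs) ys tot
    else pvMergeLoop xs ys (tot + min w v)
  termination_by xs ys _ => xs.length + ys.length
  decreasing_by all_goals (simp; try omega)

def solve_alt (X : Int) (Y : Int) (adj_lst : List (Int × List (Int × Int))) : Int :=
  let axd := PySem.Dict.mk ((PySem.Dict.mk adj_lst).getD X [])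
  let ayd := PySem.Dict.mk ((PySem.Dict.mk adj_lst).getD Y [])
  let xs := PySem.List.sorted axd.items (fun p => p.1) false
  let ys := PySem.List.sorted ayd.items (fun p => p.1) false
  pvMergeLoop xs ys (2 * axd.getD Y 0)

-- ===== PRECONDITION & SPEC =====
-- Pre_solve excludes (a) inputs whose outer or inner association lists repeat a key — those do not
-- represent any Python dict (a dict literal would collapse the duplicates) — and (b) inputs with a
-- missing key X or Y: A raises KeyError there except in the one corner where adj_lst[X] is empty and
-- Y is missing, on which A accidentally never looks Y up and returns 0 while B raises KeyError.
def Pre_solve (X : Int) (Y : Int) (adj_lst : List (Int × List (Int × Int))) : Prop :=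
  (adj_lst.map (·.1)).Nodup ∧ (∀ p ∈ adj_lst, (p.2.map (·.1)).Nodup) ∧
  X ∈ adj_lst.map (·.1) ∧ Y ∈ adj_lst.map (·.1)
instance (X : Int) (Y : Int) (adj_lst : List (Int × List (Int × Int))) : Decidable (Pre_solve X Y adj_lst) := by unfold Pre_solve; infer_instance

def pvWitness_solve : Int × Int × (List (Int × List (Int × Int))) :=
  (1, 2, [(1, [(2, 3), (3, 5)]), (2, [(1, 3), (3, 4)]), (3, [(1, 5), (2, 4)])])

def Spec_solve (X : Int) (Y : Int) (adj_lst : List (Int × List (Int × Int))) (out : Int) : Prop := out = solve_alt X Y adj_lst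
instance (X : Int) (Y : Int) (adj_lst : List (Int × List (Int × Int))) (out : Int) : Decidable (Spec_solve X Y adj_lst out) := by unfold Spec_solve; infer_instance

-- ===== CLAIM (what is proved, stated in full; the proofs are below) =====
def Claim_equal_solve : Prop := ∀ (X : Int) (Y : Int) (adj_lst : List (Int × List (Int × Int))), Dom_solve X Y adj_lst → Pre_solve X Y adj_lst → Spec_solve X Y adj_lst (solve X Y adj_lst)

-- ===== LEMMAS AND PROOFS =====

-- a foldl whose step adds a per-element amount is init + the sum of those amounts
theorem pv_foldl_add {α : Type} (f : α → Int) (g : Int → α → Int)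
    (h : ∀ t a, g t a = t + f a) :
    ∀ (l : List α) (init : Int), l.foldl g init = init + (l.map f).sum := by
  intro l
  induction l with
  | nil => intro init; simp
  | cons a l ih => intro init; simp [List.foldl, h, ih, add_assoc]

-- summing "if c = Y then v else 0" over a Nodup list that contains Y (or a list where v = 0 otherwise)
theorem pv_sum_if_eq (Y : Int) (v : Int) :
    ∀ l : List Int, l.Nodup → (Y ∉ l → v = 0) →
      (l.map (fun c => if c = Y then 2 * v else 0)).sum = 2 * v := by
  intro l
  induction l with
  | nil => intro _ h; simp [h (by simp)]
  | cons a l ih =>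
    intro hnd h
    by_cases ha : a = Y
    · subst ha
      have hnl : a ∉ l := (List.nodup_cons.mp hnd).1
      have h0 : (l.map (fun c => if c = a then 2 * v else 0)).sum = 0 := by
        apply List.sum_eq_zero
        intro x hx
        rw [List.mem_map] at hx
        obtain ⟨c, hc, rfl⟩ := hx
        have : c ≠ a := fun e => hnl (e ▸ hc)
        simp [this]
      simp [h0]
    · have hrec := ih (List.nodup_cons.mp hnd).2 (fun hy => h (by simp [hy]; exact fun e => ha e.symm))
      simp [ha, hrec]

-- lookups in Dict.mk ((b, v) :: ys) at a key ≠ b are lookups in Dict.mk ys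
theorem pv_contains_cons_ne (b : Int) (v : Int) (ys : List (Int × Int)) (k : Int) (h : k ≠ b) :
    (PySem.Dict.mk ((b, v) :: ys)).contains k = (PySem.Dict.mk ys).contains k := by
  rw [PySem.Dict.contains_eq_isSome_get?, PySem.Dict.contains_eq_isSome_get?,
      PySem.Dict.get?_mk_cons]
  simp [h.symm]

theorem pv_getD_cons_ne (b : Int) (v : Int) (ys : List (Int × Int)) (k : Int) (h : k ≠ b) :
    (PySem.Dict.mk ((b, v) :: ys)).getD k 0 = (PySem.Dict.mk ys).getD k 0 := by
  rw [PySem.Dict.getD_eq_get?_getD, PySem.Dict.getD_eq_get?_getD, PySem.Dict.get?_mk_cons]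
  simp [h.symm]

-- the per-element amount A's and B's sums use on the merge side
def pvTerm (ys : List (Int × Int)) (p : Int × Int) : Int :=
  if (PySem.Dict.mk ys).contains p.1 then min p.2 ((PySem.Dict.mk ys).getD p.1 0) else 0

-- the two-pointer merge over strictly key-increasing lists computes the guarded min-sum
theorem pv_mergeLoop_eq :
    ∀ (xs ys : List (Int × Int)) (tot : Int),
      (xs.map (·.1)).Pairwise (· < ·) → (ys.map (·.1)).Pairwise (· < ·) →
      pvMergeLoop xs ys tot = tot + (xs.map (pvTerm ys)).sum := by
  intro xs ys tot hx hy
  induction xs, ys, tot using pvMergeLoop.induct with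
  | case1 ys tot => simp [pvMergeLoop]
  | case2 p xs tot =>
    obtain ⟨a, w⟩ := p
    have h0 : (((a, w) :: xs).map (pvTerm [])).sum = 0 := by
      apply List.sum_eq_zero
      intro x hx
      rw [List.mem_map] at hx
      obtain ⟨q, _, rfl⟩ := hx
      simp [pvTerm, PySem.Dict.contains]
    rw [h0]
    simp [pvMergeLoop]
  | case3 a w xs b v ys tot hab ih =>
    rw [List.map_cons, List.pairwise_cons] at hx hy
    have hhead : pvTerm ((b, v) :: ys) (a, w) = 0 := by
      have hca : (PySem.Dict.mk ((b, v) :: ys)).contains a = false := by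
        rw [pv_contains_cons_ne b v ys a (by omega), ← Bool.not_eq_true]
        intro hc
        have hmem : a ∈ ys.map (·.1) := (PySem.Dict.contains_iff_mem_keys _ _).mp hc
        have := hy.1 a hmem
        omega
      simp [pvTerm, hca]
    rw [pvMergeLoop]
    simp only [if_pos hab]
    rw [ih hx.2 (by rw [List.map_cons, List.pairwise_cons]; exact hy)]
    simp [hhead]
  | case4 a w xs b v ys tot hab hba ih =>
    rw [List.map_cons, List.pairwise_cons] at hx hy
    have hcongr : ((a, w) :: xs).map (pvTerm ((b, v) :: ys)) = ((a, w) :: xs).map (pvTerm ys) := by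
      apply List.map_congr_left
      intro p hp
      have hpb : p.1 ≠ b := by
        rcases List.mem_cons.mp hp with hp | hp
        · rw [hp]; simp only; omega
        · have := hx.1 p.1 (List.mem_map_of_mem hp)
          omega
      simp only [pvTerm, pv_contains_cons_ne b v ys p.1 hpb, pv_getD_cons_ne b v ys p.1 hpb]
    rw [pvMergeLoop]
    simp only [if_neg hab, if_pos hba]
    rw [ih (by rw [List.map_cons, List.pairwise_cons]; exact hx) hy.2, hcongr]
  | case5 a w xs b v ys tot hab hba ih =>
    have heq : a = b := by omega
    subst heq
    rw [List.map_cons, List.pairwise_cons] at hx hy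
    have hhead : pvTerm ((a, v) :: ys) (a, w) = min w v := by
      have hc : (PySem.Dict.mk ((a, v) :: ys)).contains a = true := by
        rw [PySem.Dict.contains_eq_isSome_get?, PySem.Dict.get?_mk_cons]; simp
      have hg : (PySem.Dict.mk ((a, v) :: ys)).getD a 0 = v := by
        rw [PySem.Dict.getD_eq_get?_getD, PySem.Dict.get?_mk_cons]; simp
      simp [pvTerm, hc, hg]
    have hcongr : xs.map (pvTerm ((a, v) :: ys)) = xs.map (pvTerm ys) := by
      apply List.map_congr_left
      intro p hp
      have hpb : p.1 ≠ a := by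
        have := hx.1 p.1 (List.mem_map_of_mem hp)
        omega
      simp only [pvTerm, pv_contains_cons_ne a v ys p.1 hpb, pv_getD_cons_ne a v ys p.1 hpb]
    rw [pvMergeLoop]
    simp only [if_neg (lt_irrefl a)]
    rw [ih hx.2 hy.2, List.map_cons, hhead, hcongr]
    rw [List.sum_cons]
    ring

theorem solve_spec : Claim_equal_solve := by
  intro X Y adj _hdom hpre
  obtain ⟨hout, hinner, hX, hY⟩ := hpre
  unfold Spec_solve solve solve_alt
  set axl := (PySem.Dict.mk adj).getD X [] with haxl
  set ayl := (PySem.Dict.mk adj).getD Y [] with hayl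
  -- inner rows have Nodup keys
  have hnodup_row : ∀ (Z : Int), (((PySem.Dict.mk adj).getD Z [] : List (Int × Int)).map (·.1)).Nodup := by
    intro Z
    cases hg : (PySem.Dict.mk adj).get? Z with
    | none => simp [PySem.Dict.getD_of_get?_eq_none _ _ hg]
    | some v =>
      rw [PySem.Dict.getD_of_get?_eq_some _ _ hg]
      exact hinner (Z, v) (PySem.Dict.mem_items_of_get?_eq_some _ hg)
  have hax : (axl.map (·.1)).Nodup := hnodup_row X
  have hay : (ayl.map (·.1)).Nodup := hnodup_row Y
  have hkx : ∀ c : Int, (PySem.Dict.mk axl).contains c = true ↔ c ∈ axl.map (·.1) := by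
    intro c; rw [PySem.Dict.contains_iff_mem_keys]; rfl
  have hky : ∀ c : Int, (PySem.Dict.mk ayl).contains c = true ↔ c ∈ ayl.map (·.1) := by
    intro c; rw [PySem.Dict.contains_iff_mem_keys]; rfl
  -- A's foldl as a sum
  rw [pv_foldl_add
      (fun p : Int × Int =>
        (if p.1 == Y then 2 * (PySem.Dict.mk axl).getD p.1 0 else 0) +
        (if (PySem.Dict.mk ayl).contains p.1 then
          min ((PySem.Dict.mk axl).getD p.1 0) ((PySem.Dict.mk ayl).getD p.1 0) else 0))
      _ (by intro t a; dsimp only; split_ifs <;> ring)]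
  rw [List.sum_map_add]
  -- the doubled term
  have hterm1 :
      (axl.map (fun p => if p.1 == Y then 2 * (PySem.Dict.mk axl).getD p.1 0 else 0)).sum
        = 2 * (PySem.Dict.mk axl).getD Y 0 := by
    have hfin := pv_sum_if_eq Y ((PySem.Dict.mk axl).getD Y 0) (axl.map (·.1)) hax
      (by
        intro hmem
        apply PySem.Dict.getD_of_not_contains
        rw [← Bool.not_eq_true]
        intro hc
        exact hmem ((hkx Y).mp hc))
    calc (axl.map (fun p => if p.1 == Y then 2 * (PySem.Dict.mk axl).getD p.1 0 else 0)).sum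
        = ((axl.map (·.1)).map (fun c => if c = Y then 2 * (PySem.Dict.mk axl).getD Y 0 else 0)).sum := by
          rw [List.map_map]
          congr 1
          apply List.map_congr_left
          intro p _
          by_cases h : p.1 = Y <;> simp [Function.comp, h]
      _ = 2 * (PySem.Dict.mk axl).getD Y 0 := hfin
  rw [hterm1]
  -- B's side: the sorted item lists
  set sx := PySem.List.sorted ((PySem.Dict.mk axl).items) (fun p => p.1) false with hsx
  set sy := PySem.List.sorted ((PySem.Dict.mk ayl).items) (fun p => p.1) false with hsy
  have hitems_x : (PySem.Dict.mk axl).items = axl := rfl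
  have hitems_y : (PySem.Dict.mk ayl).items = ayl := rfl
  have hperm_x : sx.Perm axl := by rw [hsx, hitems_x]; exact PySem.List.sorted_perm _ _ _
  have hperm_y : sy.Perm ayl := by rw [hsy, hitems_y]; exact PySem.List.sorted_perm _ _ _
  -- the sorted lists are strictly increasing in their keys
  have hstrict : ∀ (s l : List (Int × Int)), s.Perm l → (l.map (·.1)).Nodup →
      (s.map (·.1)).Pairwise (fun a b => a ≤ b) → (s.map (·.1)).Pairwise (· < ·) := by
    intro s l hperm hnd hle
    have hnds : (s.map (·.1)).Nodup := ((hperm.map (·.1)).nodup_iff).mpr hnd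
    exact (hle.and hnds).imp (fun h => lt_of_le_of_ne h.1 h.2)
  have hsx_strict : (sx.map (·.1)).Pairwise (· < ·) :=
    hstrict sx axl hperm_x hax (by rw [hsx]; exact PySem.List.sorted_map_key_pairwise _ _)
  have hsy_strict : (sy.map (·.1)).Pairwise (· < ·) :=
    hstrict sy ayl hperm_y hay (by rw [hsy]; exact PySem.List.sorted_map_key_pairwise _ _)
  rw [pv_mergeLoop_eq sx sy _ hsx_strict hsy_strict]
  -- lookups in the sorted Y-dict agree with lookups in the original Y-dict
  have hterm_congr : sx.map (pvTerm sy)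
      = sx.map (fun p => if (PySem.Dict.mk ayl).contains p.1 then
          min ((PySem.Dict.mk axl).getD p.1 0) ((PySem.Dict.mk ayl).getD p.1 0) else 0) := by
    apply List.map_congr_left
    intro p hp
    have hpax : p ∈ axl := hperm_x.mem_iff.mp hp
    have hnds_y : (sy.map (·.1)).Nodup := ((hperm_y.map (·.1)).nodup_iff).mpr hay
    have hc : (PySem.Dict.mk sy).contains p.1 = (PySem.Dict.mk ayl).contains p.1 := by
      rcases hcy : (PySem.Dict.mk ayl).contains p.1 with _ | _
      · rw [← Bool.not_eq_true] at hcy ⊢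
        intro hcs
        apply hcy
        rw [hky]
        have := (PySem.Dict.contains_iff_mem_keys _ _).mp hcs
        have : p.1 ∈ sy.map (·.1) := this
        exact (hperm_y.map (·.1)).mem_iff.mp this
      · rw [PySem.Dict.contains_iff_mem_keys]
        show p.1 ∈ sy.map (·.1)
        exact (hperm_y.map (·.1)).mem_iff.mpr ((hky p.1).mp hcy)
    have hpw : p.2 = (PySem.Dict.mk axl).getD p.1 0 := by
      have : ((p.1, p.2) : Int × Int) ∈ (PySem.Dict.mk axl).items := by simpa using hpax
      exact (PySem.Dict.getD_of_mem_items _ this hax 0).symm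
    rcases hcy : (PySem.Dict.mk ayl).contains p.1 with _ | _
    · simp [pvTerm, hc, hcy]
    · have hv : ∃ v, ((p.1, v) : Int × Int) ∈ ayl := by
        have := (hky p.1).mp hcy
        rw [List.mem_map] at this
        obtain ⟨q, hq, hq1⟩ := this
        exact ⟨q.2, by rw [← hq1]; simpa using hq⟩
      obtain ⟨v, hv⟩ := hv
      have hgy : (PySem.Dict.mk ayl).getD p.1 0 = v :=
        PySem.Dict.getD_of_mem_items _ (by simpa using hv) hay 0
      have hgs : (PySem.Dict.mk sy).getD p.1 0 = v := by
        have hvs : ((p.1, v) : Int × Int) ∈ sy := hperm_y.mem_iff.mpr hv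
        exact PySem.Dict.getD_of_mem_items _ (by simpa using hvs) hnds_y 0
      simp [pvTerm, hc, hcy, hgs, hgy, hpw]
  rw [hterm_congr]
  -- the sum over the sorted list is the sum over the original list
  have hsum := (hperm_x.map (fun p : Int × Int => if (PySem.Dict.mk ayl).contains p.1 then
      min ((PySem.Dict.mk axl).getD p.1 0) ((PySem.Dict.mk ayl).getD p.1 0) else 0)).sum_eq
  rw [hsum]
  ring
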